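-- pv_equiv track=rewrite | github.com/caduuv/ifce.logcomp.projetopratico | restrictions_cnf.py | restriction3
-- ===== SOURCE A (Python) =====
-- def restriction3(rules_num, file):
--     p_index = len(file[0]) - 1
--     clauses_list = []
--     for rule in range(0, rules_num):
--         for patient in range(1, len(file)):
--             patient_list = []
--             if file[patient][p_index] == "0":
--                 for attr in range(p_index):
--                     if file[patient][attr] == '1':
--                         patient_list.append((3*attr)  +     ((3*p_index)*rule)    +   2  )
--                     elif file[patient][attr] == '0':
--                         patient_list.append((3*attr)  +    ((3*p_index)*rule)    +   1  )
--                 clauses_list.append(patient_list)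
--     return(clauses_list)
-- ===== SOURCE B (Python) =====
-- def restriction3(rules_num, file):
--     p_index = len(file[0]) - 1
--     if rules_num <= 0:
--         return []
--     bases = []
--     for row in file[1:]:
--         if row[p_index] == "0":
--             base = []
--             for attr in range(p_index):
--                 v = row[attr]
--                 if v == '1':
--                     base.append(3 * attr + 2)
--                 elif v == '0':
--                     base.append(3 * attr + 1)
--             bases.append(base)
--     out = []
--     for rule in range(rules_num):
--         offset = 3 * p_index * rule
--         for base in bases:
--             out.append([v + offset for v in base])
--     return out
-- ===== Notes on version B (the rewrite author's own statement) =====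
-- stated objective: faster
-- what changed: B precomputes each qualifying patient's base clause once (one pass over the rows) and then emits per-rule copies by adding a constant offset, instead of re-scanning every row's strings for every rule.
import Mathlib
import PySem

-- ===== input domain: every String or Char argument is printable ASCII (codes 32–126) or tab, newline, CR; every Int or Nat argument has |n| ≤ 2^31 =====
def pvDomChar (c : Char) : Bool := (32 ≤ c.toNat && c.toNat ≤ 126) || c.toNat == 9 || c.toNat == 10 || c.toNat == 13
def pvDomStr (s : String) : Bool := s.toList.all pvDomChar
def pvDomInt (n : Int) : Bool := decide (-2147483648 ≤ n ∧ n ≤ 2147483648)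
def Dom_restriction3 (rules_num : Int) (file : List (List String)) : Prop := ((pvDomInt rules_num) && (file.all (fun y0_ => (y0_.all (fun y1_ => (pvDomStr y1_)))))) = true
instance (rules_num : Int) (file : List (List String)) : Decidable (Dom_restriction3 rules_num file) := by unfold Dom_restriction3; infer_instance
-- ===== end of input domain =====

-- B precomputes each qualifying patient's base clause once, then emits per-rule copies
-- by adding a constant offset, instead of re-scanning the rows' strings for every rule.

-- ===== PORT A =====
def restriction3 (rules_num : Int) (file : List (List String)) : List (List Int) :=
  let p_index : Int := ((PySem.List.pyGetD file 0 ([] : List String)).length : Int) - 1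
  (PySem.List.pyRange 0 rules_num 1).foldl (fun clauses_list rule =>
    (PySem.List.pyRange 1 (file.length : Int) 1).foldl (fun clauses_list patient =>
      let row := PySem.List.pyGetD file patient ([] : List String)
      if PySem.List.pyGetD row p_index "" = "0" then
        clauses_list ++ [(PySem.List.pyRange 0 p_index 1).foldl (fun patient_list attr =>
          if PySem.List.pyGetD row attr "" = "1" then
            patient_list ++ [3 * attr + 3 * p_index * rule + 2]
          else if PySem.List.pyGetD row attr "" = "0" then
            patient_list ++ [3 * attr + 3 * p_index * rule + 1]
          else patient_list) ([] : List Int)]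
      else clauses_list) clauses_list) ([] : List (List Int))

-- ===== PORT B =====
def restriction3_alt (rules_num : Int) (file : List (List String)) : List (List Int) :=
  let p_index : Int := ((PySem.List.pyGetD file 0 ([] : List String)).length : Int) - 1
  if rules_num ≤ 0 then []
  else
    let bases := (PySem.List.slice file (some 1) none).foldl (fun bs row =>
      if PySem.List.pyGetD row p_index "" = "0" then
        bs ++ [(PySem.List.pyRange 0 p_index 1).foldl (fun base attr =>
          if PySem.List.pyGetD row attr "" = "1" then base ++ [3 * attr + 2]
          else if PySem.List.pyGetD row attr "" = "0" then base ++ [3 * attr + 1]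
          else base) ([] : List Int)]
      else bs) ([] : List (List Int))
    (PySem.List.pyRange 0 rules_num 1).foldl (fun out rule =>
      let offset := 3 * p_index * rule
      out ++ bases.map (fun base => base.map (fun v => v + offset))) ([] : List (List Int))

-- ===== PRECONDITION & SPEC =====
-- Pre_ excludes exactly the inputs where the Python A raises IndexError: an empty file
-- (file[0]), or — when the rule loop runs at all — a patient row too short for the
-- class-column access row[p_index] (row[-1] on an empty header needs a nonempty row).
def Pre_restriction3 (rules_num : Int) (file : List (List String)) : Prop :=
  file ≠ [] ∧ (1 ≤ rules_num →
    ∀ row ∈ file.tail, max (file.headD []).length 1 ≤ row.length)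
instance (rules_num : Int) (file : List (List String)) : Decidable (Pre_restriction3 rules_num file) := by unfold Pre_restriction3; infer_instance

def pvWitness_restriction3 : Int × List (List String) :=
  (2, [["1", "0"], ["1", "0"], ["0", "1"]])

def Spec_restriction3 (rules_num : Int) (file : List (List String)) (out : List (List Int)) : Prop := out = restriction3_alt rules_num file
instance (rules_num : Int) (file : List (List String)) (out : List (List Int)) : Decidable (Spec_restriction3 rules_num file out) := by unfold Spec_restriction3; infer_instance

-- ===== CLAIM (what is proved, stated in full; the proofs are below) =====
def Claim_equal_restriction3 : Prop := ∀ (rules_num : Int) (file : List (List String)), Dom_restriction3 rules_num file → Pre_restriction3 rules_num file → Spec_restriction3 rules_num file (restriction3 rules_num file)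

-- ===== LEMMAS AND PROOFS =====

-- per-attribute contribution of B's inner loop (at most one literal)
def pvHB (row : List String) (attr : Int) : List Int :=
  if PySem.List.pyGetD row attr "" = "1" then [3 * attr + 2]
  else if PySem.List.pyGetD row attr "" = "0" then [3 * attr + 1]
  else []

-- per-row contribution of B's bases loop
def pvRowB (p : Int) (row : List String) : List (List Int) :=
  if PySem.List.pyGetD row p "" = "0" then [(PySem.List.pyRange 0 p 1).flatMap (pvHB row)]
  else []

lemma pvInnerB_eq (p : Int) (row : List String) :
    (PySem.List.pyRange 0 p 1).foldl (fun base attr =>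
      if PySem.List.pyGetD row attr "" = "1" then base ++ [3 * attr + 2]
      else if PySem.List.pyGetD row attr "" = "0" then base ++ [3 * attr + 1]
      else base) ([] : List Int)
    = (PySem.List.pyRange 0 p 1).flatMap (pvHB row) := by
  have h : (fun (base : List Int) (attr : Int) =>
      if PySem.List.pyGetD row attr "" = "1" then base ++ [3 * attr + 2]
      else if PySem.List.pyGetD row attr "" = "0" then base ++ [3 * attr + 1]
      else base) = fun base attr => base ++ pvHB row attr := by
    funext base attr
    unfold pvHB
    split_ifs <;> simp
  rw [h, PySem.List.foldl_append_eq_flatMap]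
  simp

lemma pvInnerA_eq (p rule : Int) (row : List String) :
    (PySem.List.pyRange 0 p 1).foldl (fun pl attr =>
      if PySem.List.pyGetD row attr "" = "1" then pl ++ [3 * attr + 3 * p * rule + 2]
      else if PySem.List.pyGetD row attr "" = "0" then pl ++ [3 * attr + 3 * p * rule + 1]
      else pl) ([] : List Int)
    = ((PySem.List.pyRange 0 p 1).flatMap (pvHB row)).map (fun v => v + 3 * p * rule) := by
  have h : (fun (pl : List Int) (attr : Int) =>
      if PySem.List.pyGetD row attr "" = "1" then pl ++ [3 * attr + 3 * p * rule + 2]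
      else if PySem.List.pyGetD row attr "" = "0" then pl ++ [3 * attr + 3 * p * rule + 1]
      else pl)
      = fun pl attr => pl ++ (pvHB row attr).map (fun v => v + 3 * p * rule) := by
    funext pl attr
    unfold pvHB
    split_ifs <;> simp <;> ring
  rw [h, PySem.List.foldl_append_eq_flatMap, List.map_flatMap]
  simp

-- folding over Nat range with getD is folding over the list itself
lemma pvFlatMap_range_getD {α β : Type} (l : List α) (d : α) (h : α → List β) :
    (List.range l.length).flatMap (fun k => h (l.getD k d)) = l.flatMap h := by
  induction l with
  | nil => simp
  | cons x t ih =>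
    rw [List.length_cons, List.range_succ_eq_map, List.flatMap_cons, List.flatMap_map]
    simpa using ih

-- A's index-driven patient loop, expressed on the tail of the file
lemma pvFlatMap_pyRange_getD {β : Type} (file : List (List String))
    (h : List String → List β) :
    (PySem.List.pyRange 1 (file.length : Int) 1).flatMap
      (fun patient => h (PySem.List.pyGetD file patient ([] : List String)))
    = file.tail.flatMap h := by
  rw [PySem.List.pyRange_one, List.flatMap_map]
  have hm : ∀ k : Nat, h (PySem.List.pyGetD file ((1 : Int) + (k : Int)) ([] : List String))
      = h (file.tail.getD k ([] : List String)) := by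
    intro k
    have hc : (1 : Int) + (k : Int) = ((1 + k : Nat) : Int) := by push_cast; ring
    rw [hc, PySem.List.pyGetD_natCast]
    congr 1
    rw [List.getD_eq_getElem?_getD, List.getD_eq_getElem?_getD, ← List.drop_one,
      List.getElem?_drop]
  have hlen : ((file.length : Int) - 1).toNat = file.tail.length := by
    rw [List.length_tail]; omega
  rw [List.flatMap_congr (fun k _ => hm k), hlen]
  exact pvFlatMap_range_getD file.tail ([] : List String) h

-- per-rule: A's patient scan for a fixed rule equals B's precomputed bases shifted by the offset
lemma pvRule_eq (p : Int) (file : List (List String)) (rule : Int) (c : List (List Int)) :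
    (PySem.List.pyRange 1 (file.length : Int) 1).foldl (fun clauses patient =>
      let row := PySem.List.pyGetD file patient ([] : List String)
      if PySem.List.pyGetD row p "" = "0" then
        clauses ++ [(PySem.List.pyRange 0 p 1).foldl (fun pl attr =>
          if PySem.List.pyGetD row attr "" = "1" then pl ++ [3 * attr + 3 * p * rule + 2]
          else if PySem.List.pyGetD row attr "" = "0" then pl ++ [3 * attr + 3 * p * rule + 1]
          else pl) ([] : List Int)]
      else clauses) c
    = c ++ (file.tail.flatMap (pvRowB p)).map (fun base => base.map (fun v => v + 3 * p * rule)) := by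
  have hstep : (fun (clauses : List (List Int)) (patient : Int) =>
      let row := PySem.List.pyGetD file patient ([] : List String)
      if PySem.List.pyGetD row p "" = "0" then
        clauses ++ [(PySem.List.pyRange 0 p 1).foldl (fun pl attr =>
          if PySem.List.pyGetD row attr "" = "1" then pl ++ [3 * attr + 3 * p * rule + 2]
          else if PySem.List.pyGetD row attr "" = "0" then pl ++ [3 * attr + 3 * p * rule + 1]
          else pl) ([] : List Int)]
      else clauses)
      = fun clauses patient => clauses ++
          ((pvRowB p (PySem.List.pyGetD file patient ([] : List String))).map
            (fun base => base.map (fun v => v + 3 * p * rule))) := by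
    funext clauses patient
    simp only [pvRowB, pvInnerA_eq]
    split_ifs <;> simp
  rw [hstep, PySem.List.foldl_append_eq_flatMap]
  congr 1
  rw [← List.map_flatMap]
  congr 1
  exact pvFlatMap_pyRange_getD file (pvRowB p)

lemma pvBases_eq (p : Int) (file : List (List String)) :
    (PySem.List.slice file (some 1) none).foldl (fun bs row =>
      if PySem.List.pyGetD row p "" = "0" then
        bs ++ [(PySem.List.pyRange 0 p 1).foldl (fun base attr =>
          if PySem.List.pyGetD row attr "" = "1" then base ++ [3 * attr + 2]
          else if PySem.List.pyGetD row attr "" = "0" then base ++ [3 * attr + 1]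
          else base) ([] : List Int)]
      else bs) ([] : List (List Int))
    = file.tail.flatMap (pvRowB p) := by
  rw [PySem.List.slice_from_one]
  have hstep : (fun (bs : List (List Int)) (row : List String) =>
      if PySem.List.pyGetD row p "" = "0" then
        bs ++ [(PySem.List.pyRange 0 p 1).foldl (fun base attr =>
          if PySem.List.pyGetD row attr "" = "1" then base ++ [3 * attr + 2]
          else if PySem.List.pyGetD row attr "" = "0" then base ++ [3 * attr + 1]
          else base) ([] : List Int)]
      else bs) = fun bs row => bs ++ pvRowB p row := by
    funext bs row
    simp only [pvRowB, pvInnerB_eq]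
    split_ifs <;> simp
  rw [hstep, PySem.List.foldl_append_eq_flatMap]
  simp

lemma pvMain (rules_num : Int) (file : List (List String)) :
    restriction3 rules_num file = restriction3_alt rules_num file := by
  unfold restriction3 restriction3_alt
  set p : Int := ((PySem.List.pyGetD file 0 ([] : List String)).length : Int) - 1 with hp
  by_cases hr : rules_num ≤ 0
  · simp [PySem.List.pyRange_one_eq_nil hr, hr]
  · simp only [if_neg hr]
    rw [pvBases_eq]
    have hstep : (fun (clauses_list : List (List Int)) (rule : Int) =>
        (PySem.List.pyRange 1 (file.length : Int) 1).foldl (fun clauses_list patient =>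
          let row := PySem.List.pyGetD file patient ([] : List String)
          if PySem.List.pyGetD row p "" = "0" then
            clauses_list ++ [(PySem.List.pyRange 0 p 1).foldl (fun patient_list attr =>
              if PySem.List.pyGetD row attr "" = "1" then
                patient_list ++ [3 * attr + 3 * p * rule + 2]
              else if PySem.List.pyGetD row attr "" = "0" then
                patient_list ++ [3 * attr + 3 * p * rule + 1]
              else patient_list) ([] : List Int)]
          else clauses_list) clauses_list)
        = fun out rule =>
            out ++ (file.tail.flatMap (pvRowB p)).map
              (fun base => base.map (fun v => v + 3 * p * rule)) := by
      funext c rule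
      exact pvRule_eq p file rule c
    rw [hstep]

-- ===== VERDICT (by name: the statement is the Claim_ definition above) =====
theorem restriction3_spec : Claim_equal_restriction3 := by
  intro rules_num file _ _
  unfold Spec_restriction3
  exact pvMain rules_num file
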